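-- pv_equiv track=rewrite | github.com/Wpawlina/AGH-ITCS-Course | cwiczenia/wskazniki/delSys3_15.py | CzyWiecej
-- ===== SOURCE A (Python) =====
-- def CzyWiecej(n):
--     jedynek=0
--     dwojek=0
--     while n!=0:
--         dig=n%3
--         if dig==1:
--             jedynek+=1
--         if dig==2:
--             dwojek+=1
--         n//=3
--     return jedynek>dwojek
-- ===== SOURCE B (Python) =====
-- _T3 = (0, 1, -1)
-- _TABLE = [_T3[k % 3] + _T3[k // 3 % 3] + _T3[k // 9] for k in range(27)]
--
--
-- def CzyWiecej(n):
--     bal = 0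
--     while n != 0:
--         n, r = divmod(n, 27)
--         bal += _TABLE[r]
--     return bal > 0
-- ===== Notes on version B (the rewrite author's own statement) =====
-- stated objective: alternative
-- what changed: B keeps a single signed balance (ones minus twos) instead of two counters, and processes three base-3 digits per iteration by dividing by 27 and looking the chunk's balance contribution up in a precomputed 27-entry table; it answers balance > 0.
import Mathlib
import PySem

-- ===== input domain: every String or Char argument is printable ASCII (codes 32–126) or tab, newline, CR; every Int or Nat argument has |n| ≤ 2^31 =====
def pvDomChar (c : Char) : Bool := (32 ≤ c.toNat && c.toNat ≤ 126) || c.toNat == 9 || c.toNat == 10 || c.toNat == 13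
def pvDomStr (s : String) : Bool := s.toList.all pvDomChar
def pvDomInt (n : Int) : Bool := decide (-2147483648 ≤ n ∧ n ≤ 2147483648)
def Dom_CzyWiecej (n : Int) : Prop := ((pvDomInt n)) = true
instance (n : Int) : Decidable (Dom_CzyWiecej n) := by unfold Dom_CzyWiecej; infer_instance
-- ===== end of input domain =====

-- B keeps one signed balance (ones minus twos) and consumes three base-3 digits per
-- iteration via division by 27 and a 27-entry lookup table (objective: alternative).


-- ===== PORT A =====
-- A's while-loop, as structural recursion on the nonnegative value (on negative n the
-- Python loop never terminates, so no return value is claimed there).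
def CzyWiecejLoopA (n jedynek dwojek : Nat) : Bool :=
  if n = 0 then decide (jedynek > dwojek)
  else
    let dig := n % 3
    CzyWiecejLoopA (n / 3)
      (if dig = 1 then jedynek + 1 else jedynek)
      (if dig = 2 then dwojek + 1 else dwojek)
decreasing_by exact Nat.div_lt_self (Nat.pos_of_ne_zero (by assumption)) (by decide)

def CzyWiecej (n : Int) : Bool := CzyWiecejLoopA n.toNat 0 0

-- ===== PORT B =====
-- the module-level table: balance (count of trit 1 minus count of trit 2) of each k < 27
def pvT3 : List Int := [0, 1, -1]
def pvTable : List Int :=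
  (List.range 27).map (fun k => pvT3.getD (k % 3) 0 + pvT3.getD (k / 3 % 3) 0 + pvT3.getD (k / 9) 0)

-- B's while-loop: chunk off three trits at a time, add the chunk's table entry.
def CzyWiecejLoopB (n : Nat) (bal : Int) : Int :=
  if n = 0 then bal
  else CzyWiecejLoopB (n / 27) (bal + pvTable.getD (n % 27) 0)
decreasing_by exact Nat.div_lt_self (Nat.pos_of_ne_zero (by assumption)) (by decide)

def CzyWiecej_alt (n : Int) : Bool := decide (CzyWiecejLoopB n.toNat 0 > 0)

-- ===== PRECONDITION & SPEC =====
-- Note: on negative n the Python A (and B) loop forever (n//3, resp. n//27, converges to -1),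
-- so no return value is claimed there; both ports read the loop through n.toNat and agree trivially.
def Spec_CzyWiecej (n : Int) (out : Bool) : Prop := out = CzyWiecej_alt n
instance (n : Int) (out : Bool) : Decidable (Spec_CzyWiecej n out) := by unfold Spec_CzyWiecej; infer_instance

-- ===== CLAIM (what is proved, stated in full; the proofs are below) =====
def Claim_equal_CzyWiecej : Prop := ∀ (n : Int), Dom_CzyWiecej n → Spec_CzyWiecej n (CzyWiecej n)

-- ===== LEMMAS AND PROOFS =====
-- proof-only helper: the base-3 digit list of n (least significant first)
def pvTri (n : Nat) : List Nat :=
  if n = 0 then [] else n % 3 :: pvTri (n / 3)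
decreasing_by exact Nat.div_lt_self (Nat.pos_of_ne_zero (by assumption)) (by decide)

-- A's loop computes the counter values plus the digit counts of the remaining value.
theorem loopA_eq_counts (n jedynek dwojek : Nat) :
    CzyWiecejLoopA n jedynek dwojek =
      decide (jedynek + (pvTri n).count 1 > dwojek + (pvTri n).count 2) := by
  induction n using Nat.strong_induction_on generalizing jedynek dwojek with
  | _ n ih =>
    rw [CzyWiecejLoopA, pvTri]
    by_cases hn : n = 0
    · simp [hn]
    · rw [if_neg hn, if_neg hn,
        ih (n / 3) (Nat.div_lt_self (Nat.pos_of_ne_zero hn) (by decide))]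
      have h3 : n % 3 < 3 := Nat.mod_lt _ (by decide)
      interval_cases h : (n % 3) <;> simp <;> omega

-- the table entry of k < 27 is the balance of k's three trits
theorem table_eq (k : Nat) (hk : k < 27) :
    pvTable.getD k 0 =
      (([k % 3, k / 3 % 3, k / 9].count 1 : Int)) - ([k % 3, k / 3 % 3, k / 9].count 2 : Nat) := by
  have h : ∀ j ∈ List.range 27, pvTable.getD j 0 =
      (([j % 3, j / 3 % 3, j / 9].count 1 : Int)) - ([j % 3, j / 3 % 3, j / 9].count 2 : Nat) := by
    decide
  exact h k (List.mem_range.mpr hk)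

-- counts of nonzero trits split at a 27-chunk boundary
theorem tri_chunk (n : Nat) (i : Nat) (hi : i ≠ 0) :
    (pvTri n).count i = [n % 3, n / 3 % 3, n / 9 % 3].count i + (pvTri (n / 27)).count i := by
  by_cases h0 : n = 0
  · subst h0; simp [pvTri, Ne.symm hi]
  · rw [pvTri, if_neg h0]
    by_cases h1 : n / 3 = 0
    · have h9 : n / 9 = 0 := by omega
      have h27 : n / 27 = 0 := by omega
      rw [pvTri, if_pos h1]
      simp [pvTri, h1, h9, h27, List.count_cons]
      omega
    · rw [pvTri, if_neg h1]
      by_cases h2 : n / 3 / 3 = 0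
      · have h9 : n / 9 = 0 := by omega
        have h27 : n / 27 = 0 := by omega
        rw [pvTri, if_pos h2]
        simp [pvTri, h9, h27, List.count_cons]
        omega
      · rw [pvTri, if_neg h2]
        have e9 : n / 3 / 3 = n / 9 := by omega
        have e27 : n / 9 / 3 = n / 27 := by omega
        rw [e9, e27]
        simp [List.count_cons]
        omega

-- B's loop computes the running balance plus the signed digit balance of the rest
theorem loopB_eq_counts (n : Nat) (bal : Int) :
    CzyWiecejLoopB n bal = bal + (pvTri n).count 1 - (pvTri n).count 2 := by
  induction n using Nat.strong_induction_on generalizing bal with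
  | _ n ih =>
    rw [CzyWiecejLoopB]
    by_cases hn : n = 0
    · simp [hn, pvTri]
    · rw [if_neg hn,
        ih (n / 27) (Nat.div_lt_self (Nat.pos_of_ne_zero hn) (by decide))]
      rw [table_eq (n % 27) (Nat.mod_lt _ (by decide))]
      have c1 := tri_chunk n 1 (by decide)
      have c2 := tri_chunk n 2 (by decide)
      have e0 : n % 27 % 3 = n % 3 := by omega
      have e1 : n % 27 / 3 % 3 = n / 3 % 3 := by omega
      have e2 : n % 27 / 9 = n / 9 % 3 := by omega
      rw [e0, e1, e2]
      push_cast [c1, c2]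
      ring

-- ===== VERDICT (by name: the statement is the Claim_ definition above) =====
theorem CzyWiecej_spec : Claim_equal_CzyWiecej := by
  intro n _
  show CzyWiecej n = CzyWiecej_alt n
  simp only [CzyWiecej, CzyWiecej_alt, loopA_eq_counts, loopB_eq_counts,
    decide_eq_decide]
  omega
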